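-- pv_equiv track=rewrite | github.com/Tabdhsan/notion-scripts | master_aws_lambda_script.py | get_producer_and_director
-- ===== SOURCE A (Python) =====
-- from typing import List, Optional, TypedDict
--
-- def get_producer_and_director(crew_list: List[dict]) -> List[list]:
--     tmdb_crew_info: List[list] = [[], []]
--     for crew_member in crew_list:
--         if crew_member["job"] == "Director":
--             tmdb_crew_info[0].append(crew_member["name"])
--         elif crew_member["job"] == "Producer":
--             tmdb_crew_info[1].append(crew_member["name"])
--
--     return tmdb_crew_info
-- ===== SOURCE B (Python) =====
-- from typing import List
--
-- def get_producer_and_director(crew_list: List[dict]) -> List[list]: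
--     directors = [c["name"] for c in crew_list if c["job"] == "Director"]
--     producers = [c["name"] for c in crew_list if c["job"] == "Producer"]
--     return [directors, producers]
-- ===== Notes on version B (the rewrite author's own statement) =====
-- stated objective: idiomatic
-- what changed: Replaces the single dispatching loop mutating a two-slot accumulator with two independent filtering comprehensions, one pass per job category.
import Mathlib
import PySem

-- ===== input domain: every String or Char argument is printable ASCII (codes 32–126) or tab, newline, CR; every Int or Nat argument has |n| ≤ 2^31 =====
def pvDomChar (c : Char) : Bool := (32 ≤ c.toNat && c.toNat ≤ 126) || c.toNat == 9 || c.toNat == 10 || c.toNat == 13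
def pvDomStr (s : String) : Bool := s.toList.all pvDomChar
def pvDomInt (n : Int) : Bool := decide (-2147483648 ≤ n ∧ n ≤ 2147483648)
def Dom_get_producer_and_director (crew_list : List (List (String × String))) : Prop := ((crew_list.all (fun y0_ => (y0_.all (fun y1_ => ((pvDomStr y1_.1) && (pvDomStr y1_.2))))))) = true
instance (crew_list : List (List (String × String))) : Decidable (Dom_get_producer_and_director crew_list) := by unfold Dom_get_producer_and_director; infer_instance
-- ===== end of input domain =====

-- ===== PORT A =====
-- A: one pass, dispatching each crew member into a two-slot accumulator.
-- B: two independent filter+map passes, one per job category (idiomatic decomposition).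
def paddStep (acc : List String × List String) (cm : List (String × String)) :
    List String × List String :=
  let job := ((PySem.Dict.mk cm).get? "job").getD ""
  if job = "Director" then (acc.1 ++ [((PySem.Dict.mk cm).get? "name").getD ""], acc.2)
  else if job = "Producer" then (acc.1, acc.2 ++ [((PySem.Dict.mk cm).get? "name").getD ""])
  else acc

def get_producer_and_director (crew_list : List (List (String × String))) : List (List String) :=
  let st := crew_list.foldl paddStep ([], [])
  [st.1, st.2]

-- ===== PORT B =====
def get_producer_and_director_alt (crew_list : List (List (String × String))) : List (List String) :=
  [(crew_list.filter (fun cm => ((PySem.Dict.mk cm).get? "job").getD "" = "Director")).map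
      (fun cm => ((PySem.Dict.mk cm).get? "name").getD ""),
   (crew_list.filter (fun cm => ((PySem.Dict.mk cm).get? "job").getD "" = "Producer")).map
      (fun cm => ((PySem.Dict.mk cm).get? "name").getD "")]

-- ===== PRECONDITION & SPEC =====
-- Pre_ excludes exactly the inputs on which Python A raises KeyError: a crew member
-- missing the "job" key, or a Director/Producer member missing the "name" key.
def Pre_get_producer_and_director (crew_list : List (List (String × String))) : Prop :=
  ∀ cm ∈ crew_list, ((PySem.Dict.mk cm).get? "job").isSome = true ∧
    ((((PySem.Dict.mk cm).get? "job") = some "Director" ∨ ((PySem.Dict.mk cm).get? "job") = some "Producer") →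
      ((PySem.Dict.mk cm).get? "name").isSome = true)
instance (crew_list : List (List (String × String))) : Decidable (Pre_get_producer_and_director crew_list) := by
  unfold Pre_get_producer_and_director; infer_instance

def pvWitness_get_producer_and_director : (List (List (String × String))) :=
  [[("job", "Director"), ("name", "Ann")], [("job", "Producer"), ("name", "Bob")], [("job", "Editor")]]

def Spec_get_producer_and_director (crew_list : List (List (String × String))) (out : List (List String)) : Prop := out = get_producer_and_director_alt crew_list
instance (crew_list : List (List (String × String))) (out : List (List String)) : Decidable (Spec_get_producer_and_director crew_list out) := by unfold Spec_get_producer_and_director; infer_instance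

-- ===== CLAIM (what is proved, stated in full; the proofs are below) =====
def Claim_equal_get_producer_and_director : Prop := ∀ (crew_list : List (List (String × String))), Dom_get_producer_and_director crew_list → Pre_get_producer_and_director crew_list → Spec_get_producer_and_director crew_list (get_producer_and_director crew_list)

-- ===== LEMMAS AND PROOFS =====
theorem padd_foldl_inv (l : List (List (String × String))) (d p : List String) :
    l.foldl paddStep (d, p) =
      (d ++ (l.filter (fun cm => ((PySem.Dict.mk cm).get? "job").getD "" = "Director")).map
          (fun cm => ((PySem.Dict.mk cm).get? "name").getD ""),
       p ++ (l.filter (fun cm => ((PySem.Dict.mk cm).get? "job").getD "" = "Producer")).map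
          (fun cm => ((PySem.Dict.mk cm).get? "name").getD "")) := by
  induction l generalizing d p with
  | nil => simp
  | cons cm tl ih =>
    simp only [List.foldl_cons, paddStep]
    split_ifs with h1 h2 <;>
      simp [ih, *, List.append_assoc]

-- ===== VERDICT (by name: the statement is the Claim_ definition above) =====
theorem get_producer_and_director_spec : Claim_equal_get_producer_and_director := by
  intro crew_list _ _
  unfold Spec_get_producer_and_director get_producer_and_director get_producer_and_director_alt
  simp [padd_foldl_inv]
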